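-- pv_equiv track=rewrite | github.com/Cicerolibardi/mc102 | recursão/triangulos.py | triangulos_internos
-- ===== SOURCE A (Python) =====
-- def triangulos_internos(n):
--     """Devolve o número de triângulos (em pé)
--     de um castelo de cartas de altura n."""
--
--     if n == 0:
--         return 0
--     elif n == 1:
--         return 1
--     else:
--         tn1 = triangulos_internos(n-1) #recursão
--         tn2 = triangulos_internos(n-2) #recursão
--         return (2 * tn1) - tn2 + n
-- ===== SOURCE B (Python) =====
-- def triangulos_internos(n):
--     """Devolve o número de triângulos (em pé)
--     de um castelo de cartas de altura n."""
--     return n * (n + 1) * (n + 2) // 6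
-- ===== Notes on version B (the rewrite author's own statement) =====
-- stated objective: faster
-- what changed: replaces the exponential double recursion by the closed-form tetrahedral formula n*(n+1)*(n+2)//6
-- outside the precondition, e.g. on triangulos_internos(-1): A raises RecursionError, B returns 0
import Mathlib
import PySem

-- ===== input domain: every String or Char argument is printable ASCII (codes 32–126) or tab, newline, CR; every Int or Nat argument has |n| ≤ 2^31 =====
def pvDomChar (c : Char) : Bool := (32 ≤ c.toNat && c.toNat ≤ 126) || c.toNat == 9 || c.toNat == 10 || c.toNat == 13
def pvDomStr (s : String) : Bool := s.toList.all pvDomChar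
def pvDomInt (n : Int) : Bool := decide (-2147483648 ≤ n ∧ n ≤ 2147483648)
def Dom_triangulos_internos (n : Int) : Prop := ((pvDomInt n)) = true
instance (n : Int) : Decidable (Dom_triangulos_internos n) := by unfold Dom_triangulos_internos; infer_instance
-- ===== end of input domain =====

-- B replaces A's exponential double recursion by the closed-form tetrahedral formula n*(n+1)*(n+2)//6 (faster).


-- ===== PORT A =====
-- A's double recursion, taken step for step on the Nat value of n; the 'if n < 0' guard
-- is a totality guard only (Python A never returns for n < 0, excluded by Pre_).
def triangulosRecA : Nat → Int
  | 0 => 0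
  | 1 => 1
  | (k+2) => (2 * triangulosRecA (k+1)) - triangulosRecA k + ((k : Int) + 2)

def triangulos_internos (n : Int) : Int :=
  if n < 0 then 0 else triangulosRecA n.toNat

-- ===== PORT B =====
def triangulos_internos_alt (n : Int) : Int :=
  PySem.Int.floordiv (n * (n + 1) * (n + 2)) 6

-- ===== PRECONDITION & SPEC =====
-- Pre_ excludes n < 0, on which Python A recurses forever (RecursionError).
def Pre_triangulos_internos (n : Int) : Prop := 0 ≤ n
instance (n : Int) : Decidable (Pre_triangulos_internos n) := by unfold Pre_triangulos_internos; infer_instance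
def pvWitness_triangulos_internos : Int := (3)

def Spec_triangulos_internos (n : Int) (out : Int) : Prop := out = triangulos_internos_alt n
instance (n : Int) (out : Int) : Decidable (Spec_triangulos_internos n out) := by unfold Spec_triangulos_internos; infer_instance

-- ===== CLAIM =====
def Claim_equal_triangulos_internos : Prop := ∀ (n : Int), Dom_triangulos_internos n → Pre_triangulos_internos n → Spec_triangulos_internos n (triangulos_internos n)

-- ===== LEMMAS AND PROOFS =====
-- two-step strong induction: 6·T(m) is the tetrahedral product
theorem six_mul_triangulosRecA : ∀ (m : Nat),
    6 * triangulosRecA m = (m : Int) * (m + 1) * (m + 2) ∧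
    6 * triangulosRecA (m + 1) = ((m : Int) + 1) * (m + 2) * (m + 3) := by
  intro m
  induction m with
  | zero => simp [triangulosRecA]
  | succ k ih =>
    refine ⟨by push_cast; linarith [ih.2], ?_⟩
    have h : triangulosRecA (k + 2) =
        (2 * triangulosRecA (k + 1)) - triangulosRecA k + ((k : Int) + 2) := rfl
    push_cast
    rw [show k + 1 + 1 = k + 2 from rfl, h]
    nlinarith [ih.1, ih.2]

-- ===== VERDICT =====
theorem triangulos_internos_spec : Claim_equal_triangulos_internos := by
  intro n _ hpre
  unfold Pre_triangulos_internos at hpre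
  unfold Spec_triangulos_internos triangulos_internos triangulos_internos_alt
  rw [if_neg (by omega)]
  have h6 := (six_mul_triangulosRecA n.toNat).1
  have hn : ((n.toNat : Int)) = n := Int.toNat_of_nonneg hpre
  rw [hn] at h6
  rw [← h6, show (6 : Int) * triangulosRecA n.toNat = 6 * triangulosRecA n.toNat from rfl]
  rw [show PySem.Int.floordiv (6 * triangulosRecA n.toNat) 6 = (6 * triangulosRecA n.toNat) / 6 from
    PySem.Int.floordiv_eq_ediv_of_pos (by norm_num)]
  omega
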